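-- pv_equiv track=rewrite | github.com/aremath/texture_gen | src/median_cut.py | max_range
-- ===== SOURCE A (Python) =====
-- def max_range(pixels):
--     """Find the index of the value (r,g,b) along which
--     pixels has the maximum range"""
--     r = [p[0] for p in pixels]
--     g = [p[1] for p in pixels]
--     b = [p[2] for p in pixels]
--     r_range = max(r) - min(r)
--     g_range = max(g) - min(g)
--     b_range = max(b) - min(b)
--     ranges = [r_range, g_range, b_range]
--     max_range = max(ranges)
--     for i, m_range in enumerate(ranges):
--         if m_range == max_range:
--             return i
-- ===== SOURCE B (Python) =====
-- def max_range(pixels):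
--     it = iter(pixels)
--     try:
--         r0, g0, b0 = next(it)
--     except StopIteration:
--         raise ValueError("max_range() of empty pixels")
--     rmin = rmax = r0
--     gmin = gmax = g0
--     bmin = bmax = b0
--     for r, g, b in it:
--         if r < rmin: rmin = r
--         if r > rmax: rmax = r
--         if g < gmin: gmin = g
--         if g > gmax: gmax = g
--         if b < bmin: bmin = b
--         if b > bmax: bmax = b
--     rr = rmax - rmin
--     gr = gmax - gmin
--     br = bmax - bmin
--     if rr >= gr and rr >= br:
--         return 0
--     if gr >= br:
--         return 1
--     return 2
-- ===== Notes on version B (the rewrite author's own statement) =====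
-- stated objective: simpler
-- what changed: Replaces three channel comprehensions plus six min/max scans and an enumerate search over the ranges list with one fold over the pixels maintaining six running extrema, then a direct first-index-of-max comparison chain.
import Mathlib
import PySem

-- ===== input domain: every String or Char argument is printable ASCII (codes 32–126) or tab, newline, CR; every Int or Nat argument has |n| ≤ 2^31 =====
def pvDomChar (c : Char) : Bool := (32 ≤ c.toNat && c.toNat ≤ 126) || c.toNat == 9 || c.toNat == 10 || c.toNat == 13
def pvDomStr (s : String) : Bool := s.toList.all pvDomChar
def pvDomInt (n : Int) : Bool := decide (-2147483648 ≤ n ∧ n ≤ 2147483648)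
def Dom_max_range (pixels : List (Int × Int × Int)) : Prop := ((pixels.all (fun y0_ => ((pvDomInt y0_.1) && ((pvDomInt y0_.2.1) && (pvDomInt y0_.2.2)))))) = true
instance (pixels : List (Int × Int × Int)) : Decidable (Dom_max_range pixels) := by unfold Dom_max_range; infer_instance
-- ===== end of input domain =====

-- B replaces A's nine scans (three comprehensions, six min/max, an enumerate search)
-- with one fold over the pixels keeping six running extrema; simpler pass structure, same values.

-- ===== PORT A =====
-- max(xs) / min(xs): PySem primitive; none (empty list, Python ValueError) is excluded by Pre_.
def pyMaxI (xs : List Int) : Int :=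
  match PySem.List.max? xs (fun x => x) with
  | some m => m
  | none => 0

def pyMinI (xs : List Int) : Int :=
  match PySem.List.min? xs (fun x => x) with
  | some m => m
  | none => 0

-- the 'for i, m_range in enumerate(ranges)' loop, carrying the running index
def pvScan (l : List Int) (m : Int) (i : Int) : Int :=
  match l with
  | [] => 0
  | v :: t => if v = m then i else pvScan t m (i + 1)

def max_range (pixels : List (Int × Int × Int)) : Int :=
  let r := pixels.map (fun p => p.1)
  let g := pixels.map (fun p => p.2.1)
  let b := pixels.map (fun p => p.2.2)
  let r_range := pyMaxI r - pyMinI r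
  let g_range := pyMaxI g - pyMinI g
  let b_range := pyMaxI b - pyMinI b
  let ranges := [r_range, g_range, b_range]
  let mr := pyMaxI ranges
  pvScan ranges mr 0

-- ===== PORT B =====
def pvBLoop : List (Int × Int × Int) → Int → Int → Int → Int → Int → Int → Int
  | [], rmin, rmax, gmin, gmax, bmin, bmax =>
    let rr := rmax - rmin
    let gr := gmax - gmin
    let br := bmax - bmin
    if rr ≥ gr ∧ rr ≥ br then 0 else if gr ≥ br then 1 else 2
  | (r, g, b) :: t, rmin, rmax, gmin, gmax, bmin, bmax =>
    pvBLoop t (min rmin r) (max rmax r) (min gmin g) (max gmax g) (min bmin b) (max bmax b)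

def max_range_alt (pixels : List (Int × Int × Int)) : Int :=
  match pixels with
  | [] => 0   -- Python B raises ValueError here; excluded by Pre_
  | (r0, g0, b0) :: rest => pvBLoop rest r0 r0 g0 g0 b0 b0

-- ===== PRECONDITION & SPEC =====
-- A raises ValueError (max of empty sequence) on empty pixels.
def Pre_max_range (pixels : List (Int × Int × Int)) : Prop := pixels ≠ []
instance (pixels : List (Int × Int × Int)) : Decidable (Pre_max_range pixels) := by unfold Pre_max_range; infer_instance
def pvWitness_max_range : (List (Int × Int × Int)) := [(1, 2, 3), (0, 5, 3)]

def Spec_max_range (pixels : List (Int × Int × Int)) (out : Int) : Prop := out = max_range_alt pixels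
instance (pixels : List (Int × Int × Int)) (out : Int) : Decidable (Spec_max_range pixels out) := by unfold Spec_max_range; infer_instance

-- ===== CLAIM (what is proved, stated in full; the proofs are below) =====
def Claim_equal_max_range : Prop := ∀ (pixels : List (Int × Int × Int)), Dom_max_range pixels → Pre_max_range pixels → Spec_max_range pixels (max_range pixels)

-- ===== LEMMAS AND PROOFS =====

theorem pyMaxI_cons (x : Int) (t : List Int) : pyMaxI (x :: t) = t.foldl max x := by
  simp [pyMaxI, PySem.List.max?_id_cons]

theorem pyMinI_cons (x : Int) (t : List Int) : pyMinI (x :: t) = t.foldl min x := by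
  simp [pyMinI, PySem.List.min?_id_cons]

-- B's loop computes the decision over the three folded channel extrema
theorem pvBLoop_eq (t : List (Int × Int × Int)) :
    ∀ rmin rmax gmin gmax bmin bmax : Int,
      pvBLoop t rmin rmax gmin gmax bmin bmax =
        (let rr := (t.map (fun p => p.1)).foldl max rmax - (t.map (fun p => p.1)).foldl min rmin
         let gr := (t.map (fun p => p.2.1)).foldl max gmax - (t.map (fun p => p.2.1)).foldl min gmin
         let br := (t.map (fun p => p.2.2)).foldl max bmax - (t.map (fun p => p.2.2)).foldl min bmin
         if rr ≥ gr ∧ rr ≥ br then 0 else if gr ≥ br then 1 else 2) := by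
  induction t with
  | nil => intro _ _ _ _ _ _; simp [pvBLoop]
  | cons p t ih =>
    intro rmin rmax gmin gmax bmin bmax
    obtain ⟨r, g, b⟩ := p
    simpa [pvBLoop, List.foldl_cons] using ih (min rmin r) (max rmax r) (min gmin g) (max gmax g) (min bmin b) (max bmax b)

-- ===== VERDICT (by name: the statement is the Claim_ definition above) =====
theorem max_range_spec : Claim_equal_max_range := by
  intro pixels _ hpre
  unfold Spec_max_range
  match pixels with
  | [] => exact absurd rfl hpre
  | (r0, g0, b0) :: rest =>
    simp only [max_range, max_range_alt, List.map_cons, pyMaxI_cons, pyMinI_cons, pvBLoop_eq]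
    set rr := (rest.map (fun p => p.1)).foldl max r0 - (rest.map (fun p => p.1)).foldl min r0 with hrr
    set gr := (rest.map (fun p => p.2.1)).foldl max g0 - (rest.map (fun p => p.2.1)).foldl min g0 with hgr
    set br := (rest.map (fun p => p.2.2)).foldl max b0 - (rest.map (fun p => p.2.2)).foldl min b0 with hbr
    simp only [List.foldl]
    simp only [pvScan]
    split_ifs <;> omega
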